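-- pv_equiv track=rewrite | github.com/jyotsna819/daa | Selection_itr.py | iterative_selection_sort
-- ===== SOURCE A (Python) =====
-- def iterative_selection_sort(arr):
--     comparisons = 0
--     swaps = 0
--     n = len(arr)
--     for i in range(n - 1):
--         min_index = i
--         for j in range(i + 1, n):
--             comparisons += 1
--             if arr[j] < arr[min_index]:
--                 min_index = j
--         if min_index != i:
--             arr[i], arr[min_index] = arr[min_index], arr[i]
--             swaps += 1
--     return comparisons, swaps
-- ===== SOURCE B (Python) =====
-- def iterative_selection_sort(arr):
--     # Recursive rebuild: comparisons in closed form; swaps counted while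
--     # recursively extracting the first minimum and rebuilding front-to-back.
--     # arr is overwritten with the sorted result, like the original.
--     def go(xs):
--         if len(xs) < 2:
--             return list(xs), 0
--         k = xs.index(min(xs))
--         if k == 0:
--             tail, s = go(xs[1:])
--             return [xs[0]] + tail, s
--         rest = xs[1:]
--         rest[k - 1] = xs[0]
--         tail, s = go(rest)
--         return [xs[k]] + tail, s + 1
--
--     n = len(arr)
--     out, swaps = go(arr)
--     arr[:] = out
--     return n * (n - 1) // 2, swaps
-- ===== Notes on version B (the rewrite author's own statement) =====
-- stated objective: alternative
-- what changed: B replaces A's nested index loops with counters and in-place index swaps by a recursive decomposition: comparisons come from the closed form n*(n-1)//2, and swaps are counted while recursively extracting each round's first minimum from a list and rebuilding the sorted list front-to-back (no indices over the original array, no comparison counter).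
import Mathlib
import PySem

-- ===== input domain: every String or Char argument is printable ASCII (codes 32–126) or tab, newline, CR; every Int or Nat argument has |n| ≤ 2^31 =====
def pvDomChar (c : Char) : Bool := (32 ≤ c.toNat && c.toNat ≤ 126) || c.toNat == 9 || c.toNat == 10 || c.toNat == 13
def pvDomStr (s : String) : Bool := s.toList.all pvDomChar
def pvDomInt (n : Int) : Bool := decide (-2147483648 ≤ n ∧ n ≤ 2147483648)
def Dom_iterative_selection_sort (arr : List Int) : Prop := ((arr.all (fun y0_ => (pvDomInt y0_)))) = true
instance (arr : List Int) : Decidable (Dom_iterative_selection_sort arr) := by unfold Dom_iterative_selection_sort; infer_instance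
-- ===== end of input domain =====

-- B counts comparisons in closed form (n*(n-1)//2) and counts swaps by a recursive
-- front-to-back rebuild instead of A's nested index loops; both Pythons leave arr
-- sorted in place — the equivalence proved here is about the return value.

-- ===== PORT A =====
-- all indices touched are in [0, n), so pyGetD with default 0 and .toNat for list.set are Python-exact here
def selA_step (n : Int) (st : List Int × Int × Int) (i : Int) : List Int × Int × Int :=
  let a := st.1
  let p := (PySem.List.pyRange (i+1) n).foldl
      (fun (q : Int × Int) j =>
        let c := q.2 + 1
        if PySem.List.pyGetD a j 0 < PySem.List.pyGetD a q.1 0 then (j, c) else (q.1, c))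
      (i, st.2.1)
  if p.1 ≠ i then
    ((a.set i.toNat (PySem.List.pyGetD a p.1 0)).set p.1.toNat (PySem.List.pyGetD a i 0), p.2, st.2.2 + 1)
  else (a, p.2, st.2.2)

def iterative_selection_sort (arr : List Int) : Int × Int :=
  let n : Int := arr.length
  let r := (PySem.List.pyRange 0 (n-1)).foldl (selA_step n) (arr, 0, 0)
  (r.2.1, r.2.2)

-- ===== PORT B =====
-- go(xs): min(xs)/xs.index are min?/index?; both branches only run on nonempty xs, so getD never
-- supplies its default; xs[1:] is slice, rest[k-1] = xs[0] is pySetD.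
def selB_go (xs : List Int) : List Int × Int :=
  if xs.length < 2 then (xs, 0)
  else
    let m := (PySem.List.min? xs (fun v => v)).getD 0
    let k := (PySem.List.index? xs m).getD 0
    if k = 0 then
      let r := selB_go (PySem.List.slice xs (some 1) none)
      (PySem.List.pyGetD xs 0 0 :: r.1, r.2)
    else
      let rest := PySem.List.pySetD (PySem.List.slice xs (some 1) none) ((k : Int) - 1) (PySem.List.pyGetD xs 0 0)
      let r := selB_go rest
      (PySem.List.pyGetD xs (k : Int) 0 :: r.1, r.2 + 1)
termination_by xs.length
decreasing_by
  · simp [PySem.List.slice_from_one]; omega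
  · simp [PySem.List.length_pySetD, PySem.List.slice_from_one]; omega

def iterative_selection_sort_alt (arr : List Int) : Int × Int :=
  let n : Int := arr.length
  let r := selB_go arr
  (PySem.Int.floordiv (n * (n - 1)) 2, r.2)

-- ===== PRECONDITION & SPEC =====
def Spec_iterative_selection_sort (arr : List Int) (out : Int × Int) : Prop := out = iterative_selection_sort_alt arr
instance (arr : List Int) (out : Int × Int) : Decidable (Spec_iterative_selection_sort arr out) := by unfold Spec_iterative_selection_sort; infer_instance

-- ===== CLAIM (what is proved, stated in full; the proofs are below) =====
def Claim_equal_iterative_selection_sort : Prop := ∀ (arr : List Int), Dom_iterative_selection_sort arr → Spec_iterative_selection_sort arr (iterative_selection_sort arr)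

-- ===== LEMMAS AND PROOFS =====

-- A's counting inner fold = (counter-free min-index fold, start + length)
theorem splitA (key : Int → Int) :
    ∀ (l : List Int) (m c : Int),
      l.foldl (fun (q : Int × Int) j =>
          let c := q.2 + 1
          if key j < key q.1 then (j, c) else (q.1, c)) (m, c)
      = (l.foldl (fun m j => if key j < key m then j else m) m, c + l.length) := by
  intro l
  induction l with
  | nil => intro m c; simp
  | cons x t ih =>
    intro m c
    simp only [List.foldl_cons, List.length_cons]
    by_cases h : key x < key m
    · simp only [h, if_pos, ih]
      rw [Prod.mk.injEq]; exact ⟨rfl, by push_cast; ring⟩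
    · simp only [h, if_neg, ih, not_false_iff]
      rw [Prod.mk.injEq]; exact ⟨rfl, by push_cast; ring⟩

-- proof-side intermediate: A's outer step with the comparison counter stripped off
def selMid_step (n : Int) (st : List Int × Int) (i : Int) : List Int × Int :=
  let a := st.1
  let M := (PySem.List.pyRange (i+1) n).foldl
      (fun m j => if PySem.List.pyGetD a j 0 < PySem.List.pyGetD a m 0 then j else m) i
  if M ≠ i then
    ((a.set i.toNat (PySem.List.pyGetD a M 0)).set M.toNat (PySem.List.pyGetD a i 0), st.2 + 1)
  else (a, st.2)

-- one outer-loop step: A's step is the stripped step plus the inner range length of comparisons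
theorem step_rel (n i : Int) (a : List Int) (c s : Int) :
    selA_step n (a, c, s) i
      = ((selMid_step n (a, s) i).1, c + ((PySem.List.pyRange (i+1) n).length : Int),
         (selMid_step n (a, s) i).2) := by
  simp only [selA_step, selMid_step, splitA (fun j => PySem.List.pyGetD a j 0)]
  by_cases h : (List.foldl (fun m j => if PySem.List.pyGetD a j 0 < PySem.List.pyGetD a m 0 then j else m) i
      (PySem.List.pyRange (i+1) n)) = i <;> simp [h]

-- whole outer loop: A's fold = stripped fold, with comparisons = start + Σ inner lengths
theorem outer_rel (n : Int) :
    ∀ (is : List Int) (a : List Int) (c s : Int),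
      is.foldl (selA_step n) (a, c, s)
        = ((is.foldl (selMid_step n) (a, s)).1,
           c + ((is.map (fun i => ((PySem.List.pyRange (i+1) n).length : Int))).sum),
           (is.foldl (selMid_step n) (a, s)).2) := by
  intro is
  induction is with
  | nil => intro a c s; simp
  | cons i t ih =>
    intro a c s
    simp only [List.foldl_cons, List.map_cons, List.sum_cons, step_rel, ih]
    rw [add_assoc]

-- length of a step-1 range
theorem pyRange_len : ∀ (m : Nat) (a b : Int), b - a = m → (PySem.List.pyRange a b).length = m := by
  intro m
  induction m with
  | zero => intro a b h; rw [PySem.List.pyRange_one_eq_nil (by omega)]; rfl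
  | succ k ih =>
    intro a b h
    rw [PySem.List.pyRange_one_cons (by omega)]
    simp [ih (a+1) b (by omega)]

-- Gauss: the inner lengths over the outer range sum to m*(m+1)/2 where m = n-1-a
theorem sum_len : ∀ (m : Nat) (a n : Int), (n - 1) - a = m →
    ((PySem.List.pyRange a (n-1)).map (fun i => ((PySem.List.pyRange (i+1) n).length : Int))).sum
      = ((m : Int) * (m + 1)) / 2 := by
  intro m
  induction m with
  | zero =>
    intro a n h
    rw [PySem.List.pyRange_one_eq_nil (by omega)]; simp
  | succ k ih =>
    intro a n h
    rw [PySem.List.pyRange_one_cons (by omega)]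
    simp only [List.map_cons, List.sum_cons]
    rw [pyRange_len (k+1) (a+1) n (by push_cast; omega), ih (a+1) n (by omega)]
    obtain ⟨x, hx⟩ : (2:Int) ∣ (k:Int) * (k + 1) := (Int.even_mul_succ_self (k:Int)).two_dvd
    obtain ⟨y, hy⟩ : (2:Int) ∣ ((k:Int)+1) * ((k+1) + 1) := (Int.even_mul_succ_self ((k:Int)+1)).two_dvd
    have hxy : ((k:Int)+1) * ((k+1) + 1) = (k:Int) * (k + 1) + 2 * ((k:Int)+1) := by ring
    rw [hx, Int.mul_ediv_cancel_left _ (by norm_num)]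
    push_cast
    rw [hy, Int.mul_ediv_cancel_left _ (by norm_num)]
    omega

-- running min pulls out of a foldl
theorem foldl_min_pull : ∀ (t : List Int) (x h : Int), t.foldl min (min x h) = min x (t.foldl min h) := by
  intro t
  induction t with
  | nil => intro x h; rfl
  | cons a t ih => intro x h; simp only [List.foldl_cons]; rw [min_assoc, ih]

-- head-recursion for min? with the identity key
theorem min?_id_rec (x : Int) (r : List Int) :
    PySem.List.min? (x :: r) (fun v => v)
      = some (match PySem.List.min? r (fun v => v) with
              | none => x
              | some u => min x u) := by
  cases r with
  | nil => rw [PySem.List.min?_id_cons]; rfl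
  | cons h t =>
    rw [PySem.List.min?_id_cons, PySem.List.min?_id_cons]
    simp only [List.foldl_cons]
    rw [foldl_min_pull]

-- proof-side shape of A's inner min-index scan: current best value c at index m, next index j
def fmiAux (c m j : Int) : List Int → Int
  | [] => m
  | x :: r => if x < c then fmiAux x j (j+1) r else fmiAux c m (j+1) r

-- A's index fold is fmiAux when key matches the scanned values
theorem fold_fmi (key : Int → Int) :
    ∀ (r : List Int) (m j : Int),
      (∀ (t : Nat), (ht : t < r.length) → key (j + t) = r[t]) →
      (PySem.List.pyRange j (j + (r.length : Int))).foldl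
        (fun m' j' => if key j' < key m' then j' else m') m
      = fmiAux (key m) m j r := by
  intro r
  induction r with
  | nil =>
    intro m j h
    rw [show j + ((([]:List Int).length : Nat) : Int) = j by simp,
      PySem.List.pyRange_one_eq_nil (le_refl j)]
    rfl
  | cons x r ih =>
    intro m j h
    have hx : key j = x := by simpa using h 0 (by simp)
    have hb : j + (((x :: r).length : Nat) : Int) = (j+1) + (r.length : Int) := by
      simp only [List.length_cons]; push_cast; ring
    rw [hb, PySem.List.pyRange_one_cons (by omega)]
    simp only [List.foldl_cons]
    have hrest : ∀ (t : Nat), (ht : t < r.length) → key ((j+1) + t) = r[t] := by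
      intro t ht
      have h1 := h (t+1) (by simpa using Nat.succ_lt_succ ht)
      have h2 : j + ((t+1 : Nat) : Int) = (j+1) + (t : Int) := by push_cast; ring
      rw [h2] at h1
      simpa using h1
    by_cases hc : x < key m
    · have : (if key j < key m then j else m) = j := by rw [hx]; simp [hc]
      rw [this, ih j (j+1) hrest, hx]
      simp [fmiAux, hc]
    · have : (if key j < key m then j else m) = m := by rw [hx]; simp [hc]
      rw [this, ih m (j+1) hrest]
      simp [fmiAux, hc]

-- what fmiAux computes, in terms of min? and index? of the unscanned suffix
theorem fmiAux_spec : ∀ (r : List Int) (c m j : Int),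
    fmiAux c m j r
      = (match PySem.List.min? r (fun v => v) with
         | none => m
         | some u => if u < c then j + (((PySem.List.index? r u).getD 0 : Nat) : Int) else m) := by
  intro r
  induction r with
  | nil => intro c m j; rfl
  | cons x r ih =>
    intro c m j
    rw [min?_id_rec]
    cases hmr : PySem.List.min? r (fun v => v) with
    | none =>
      have hr : r = [] := (PySem.List.min?_eq_none_iff r _).mp hmr
      subst hr
      simp only [fmiAux, PySem.List.index?_cons_self]
      by_cases hc : x < c <;> simp [hc]
    | some u =>
      have hu : u ∈ r := PySem.List.min?_mem hmr
      obtain ⟨i0, hi0⟩ : ∃ i0, PySem.List.index? r u = some i0 :=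
        Option.isSome_iff_exists.mp ((PySem.List.index?_isSome_iff r u).mpr hu)
      simp only [fmiAux, ih, hmr, hi0, Option.getD_some]
      by_cases hux : u < x
      · have hne : x ≠ u := by omega
        have hmin : min x u = u := by omega
        rw [hmin, PySem.List.index?_cons_of_ne r hne, hi0]
        simp only [Option.map_some, Option.getD_some]
        by_cases hc : x < c
        · have : u < c := by omega
          simp only [hux, if_pos, this, hc]
          push_cast; ring
        · by_cases huc : u < c
          · simp only [hux, if_pos, huc, hc, if_false]
            push_cast; ring
          · simp [hc, huc]
      · have hmin : min x u = x := by omega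
        rw [hmin, PySem.List.index?_cons_self]
        simp only [Option.getD_some]
        by_cases hc : x < c
        · have : ¬ u < x := hux
          simp [hc, this]
        · have : ¬ u < c := by omega
          simp [hc, this]

-- A's chosen index, started at i with value x, is i + (B's k) on the suffix x :: r
theorem fmi_eq (x : Int) (r : List Int) (i : Int) :
    fmiAux x i (i+1) r
      = i + (((PySem.List.index? (x :: r)
               ((PySem.List.min? (x :: r) (fun v => v)).getD 0)).getD 0 : Nat) : Int) := by
  rw [fmiAux_spec, min?_id_rec]
  cases hmr : PySem.List.min? r (fun v => v) with
  | none =>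
    simp only [Option.getD_some]
    rw [PySem.List.index?_cons_self]
    simp
  | some u =>
    have hu : u ∈ r := PySem.List.min?_mem hmr
    obtain ⟨i0, hi0⟩ : ∃ i0, PySem.List.index? r u = some i0 :=
      Option.isSome_iff_exists.mp ((PySem.List.index?_isSome_iff r u).mpr hu)
    simp only [hi0, Option.getD_some]
    by_cases hux : u < x
    · have hne : x ≠ u := by omega
      have hmin : min x u = u := by omega
      rw [hmin, PySem.List.index?_cons_of_ne r hne, hi0]
      simp only [hux, if_pos, Option.map_some, Option.getD_some]
      push_cast; ring
    · have hmin : min x u = x := by omega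
      rw [hmin, PySem.List.index?_cons_self]
      simp [hux]

-- unfolding selB_go on a cons cell whose chosen index is k
theorem selB_go_cons (x : Int) (r : List Int) (k : Nat) (hr : r ≠ [])
    (hk : (PySem.List.index? (x :: r)
            ((PySem.List.min? (x :: r) (fun v => v)).getD 0)).getD 0 = k) :
    selB_go (x :: r)
      = if k = 0 then (x :: (selB_go r).1, (selB_go r).2)
        else ((x :: r).getD k 0 :: (selB_go (r.set (k-1) x)).1, (selB_go (r.set (k-1) x)).2 + 1) := by
  rw [selB_go.eq_def]
  have h2 : ¬ (x :: r).length < 2 := by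
    cases r with
    | nil => exact absurd rfl hr
    | cons y t => simp
  rw [if_neg h2]
  simp only [PySem.List.slice_from_one, List.tail_cons, PySem.List.pyGetD_zero_cons, hk]
  split_ifs with hk0
  · rfl
  · have hc : ((k : Int) - 1) = (((k - 1 : Nat)) : Int) := by omega
    rw [hc, PySem.List.pySetD_natCast, PySem.List.pyGetD_natCast]

-- base of the loop: at most one element left, the range is empty and selB_go stops
theorem swapBase (a : List Int) (i : Nat) (s : Int) (h : a.length ≤ i + 1) :
    (PySem.List.pyRange (i : Int) ((a.length : Int) - 1)).foldl (selMid_step (a.length : Int)) (a, s)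
    = (a.take i ++ (selB_go (a.drop i)).1, s + (selB_go (a.drop i)).2) := by
  have hc : ((a.length : Int) - 1) ≤ (i : Int) := by
    have : (a.length : Int) ≤ (i : Int) + 1 := by exact_mod_cast h
    omega
  rw [PySem.List.pyRange_one_eq_nil hc]
  have hlen : (a.drop i).length < 2 := by simp; omega
  rw [List.foldl_nil, selB_go.eq_def, if_pos hlen]
  simp [List.take_append_drop]

-- the main loop invariant: the stripped fold from position i is B's recursion on the suffix
theorem swapLoop : ∀ (d : Nat) (a : List Int) (i : Nat) (s : Int),
    a.length - i ≤ d →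
    (PySem.List.pyRange (i : Int) ((a.length : Int) - 1)).foldl (selMid_step (a.length : Int)) (a, s)
    = (a.take i ++ (selB_go (a.drop i)).1, s + (selB_go (a.drop i)).2) := by
  intro d
  induction d with
  | zero =>
    intro a i s hd
    exact swapBase a i s (by omega)
  | succ d ih =>
    intro a i s hd
    by_cases hend : a.length ≤ i + 1
    · exact swapBase a i s hend
    · -- i + 2 ≤ a.length : there is at least one full round left
      have hi2 : i + 2 ≤ a.length := by omega
      have hi : i < a.length := by omega
      have hi1 : i + 1 < a.length := by omega
      have hdropi : a.drop i = a[i] :: a.drop (i+1) := List.drop_eq_getElem_cons hi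
      have hrne : a.drop (i+1) ≠ [] := by
        have : (a.drop (i+1)).length ≠ 0 := by simp; omega
        exact fun hnil => this (by rw [hnil]; rfl)
      -- the scan of A's round i is fmiAux, which is i + k for B's k
      have hkey : ∀ (t : Nat), (ht : t < (a.drop (i+1)).length) →
          PySem.List.pyGetD a (((i : Int)+1) + t) 0 = (a.drop (i+1))[t] := by
        intro t ht
        have htlen : i + 1 + t < a.length := by simp at ht; omega
        have hcast : ((i : Int)+1) + (t : Int) = ((i + 1 + t : Nat) : Int) := by push_cast; ring
        rw [hcast, PySem.List.pyGetD_natCast, List.getD_eq_getElem _ _ htlen, List.getElem_drop]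
      have hbound : (a.length : Int) = ((i : Int)+1) + ((a.drop (i+1)).length : Int) := by
        simp; omega
      have hgx : PySem.List.pyGetD a (i : Int) 0 = a[i] := by
        rw [PySem.List.pyGetD_natCast, List.getD_eq_getElem _ _ hi]
      -- B's round index
      set k : Nat := (PySem.List.index? (a.drop i)
          ((PySem.List.min? (a.drop i) (fun v => v)).getD 0)).getD 0 with hkdef
      have hM : (PySem.List.pyRange ((i : Int)+1) (a.length : Int)).foldl
          (fun m j => if PySem.List.pyGetD a j 0 < PySem.List.pyGetD a m 0 then j else m) (i : Int)
          = (i : Int) + (k : Int) := by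
        rw [hbound, fold_fmi _ _ _ _ hkey, hgx]
        have := fmi_eq a[i] (a.drop (i+1)) (i : Int)
        rw [← hdropi] at this
        rw [this]
      -- k is a valid index into the suffix
      have hkin : k < (a.drop i).length := by
        obtain ⟨m0, hm0⟩ : ∃ m0, PySem.List.min? (a.drop i) (fun v => v) = some m0 := by
          cases h : PySem.List.min? (a.drop i) (fun v => v) with
          | none =>
            have := (PySem.List.min?_eq_none_iff (a.drop i) _).mp h
            rw [hdropi] at this; exact absurd this (List.cons_ne_nil _ _)
          | some m0 => exact ⟨m0, rfl⟩
        have hmem : m0 ∈ a.drop i := PySem.List.min?_mem hm0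
        obtain ⟨k0, hk0⟩ : ∃ k0, PySem.List.index? (a.drop i) m0 = some k0 :=
          Option.isSome_iff_exists.mp ((PySem.List.index?_isSome_iff (a.drop i) m0).mpr hmem)
        obtain ⟨hk0lt, -⟩ := PySem.List.getElem_of_index?_eq_some hk0
        have : k = k0 := by rw [hkdef, hm0, Option.getD_some, hk0, Option.getD_some]
        omega
      have hkdrop : k < a.length - i := by simpa using hkin
      -- peel the first round off the range
      have hlt : (i : Int) < (a.length : Int) - 1 := by
        have : ((i : Int)) + 2 ≤ (a.length : Int) := by exact_mod_cast hi2
        omega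
      rw [PySem.List.pyRange_one_cons hlt, List.foldl_cons]
      have hgo := selB_go_cons a[i] (a.drop (i+1)) k hrne (by rw [← hdropi, ← hkdef])
      rw [← hdropi] at hgo
      by_cases hk0 : k = 0
      · -- no swap this round
        have hstep : selMid_step (a.length : Int) (a, s) (i : Int) = (a, s) := by
          simp only [selMid_step, hM, hk0]
          simp
        rw [hstep]
        have hih := ih a (i+1) s (by omega)
        have hcast : (((i+1 : Nat)) : Int) = (i : Int) + 1 := by push_cast; ring
        rw [hcast] at hih
        rw [hih, hgo, if_pos hk0]
        have htk : a.take (i+1) = a.take i ++ [a[i]] := by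
          rw [List.take_add_one, List.getElem?_eq_getElem hi]
          rfl
        rw [Prod.mk.injEq]
        refine ⟨?_, rfl⟩
        rw [htk, List.append_assoc]
        rfl
      · -- swap this round
        have hik : i + k < a.length := by omega
        have hv : PySem.List.pyGetD a ((i : Int) + (k : Int)) 0 = a[i+k] := by
          have hcast : ((i : Int) + (k : Int)) = ((i + k : Nat) : Int) := by push_cast; ring
          rw [hcast, PySem.List.pyGetD_natCast, List.getD_eq_getElem _ _ hik]
        have h1k : 1 ≤ k := by omega
        have hstep : selMid_step (a.length : Int) (a, s) (i : Int)
            = ((a.set i a[i+k]).set (i+k) a[i], s + 1) := by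
          simp only [selMid_step, hM]
          rw [if_pos (by omega : ¬ ((i : Int) + (k : Int) = (i : Int))), hv, hgx]
          have ht1 : ((i : Int)).toNat = i := by omega
          have ht2 : ((i : Int) + (k : Int)).toNat = i + k := by omega
          rw [ht1, ht2]
        rw [hstep]
        set a' : List Int := (a.set i a[i+k]).set (i+k) a[i] with ha'
        have hlen' : a'.length = a.length := by simp [ha']
        have hih := ih a' (i+1) (s+1) (by rw [hlen']; omega)
        rw [hlen'] at hih
        have hcast : (((i+1 : Nat)) : Int) = (i : Int) + 1 := by push_cast; ring
        rw [hcast] at hih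
        rw [hih, hgo, if_neg hk0]
        -- bookkeeping: prefix, swapped-in element, and the rest of the suffix
        have f2a : a'.take i = a.take i := by
          rw [ha', List.take_set, List.take_set,
            List.set_eq_of_length_le (by simp; try omega),
            List.set_eq_of_length_le (by simp; try omega)]
        have f2b : a'[i]'(by omega) = a[i+k] := by
          simp only [ha', List.getElem_set]
          rw [if_neg (by omega : ¬ (i + k = i))]
          simp
        have f2 : a'.take (i+1) = a.take i ++ [a[i+k]] := by
          rw [List.take_add_one, List.getElem?_eq_getElem (by omega : i < a'.length), f2b, f2a]
          rfl
        have f3 : a'.drop (i+1) = (a.drop (i+1)).set (k-1) a[i] := by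
          apply List.ext_getElem
          · simp [ha']
          · intro t h1 h2
            have ht : t < a.length - (i + 1) := by simpa [ha'] using h1
            rw [List.getElem_drop]
            simp only [ha', List.getElem_set, List.getElem_drop]
            split_ifs <;> first | rfl | omega
        have hgetd : (a.drop i).getD k 0 = a[i+k] := by
          rw [List.getD_eq_getElem _ _ hkin, List.getElem_drop]
        rw [f2, f3, hgetd]
        simp only [Prod.mk.injEq]
        constructor
        · rw [List.append_assoc]; rfl
        · ring

-- ===== VERDICT (by name: the statement is the Claim_ definition above) =====
theorem iterative_selection_sort_spec : Claim_equal_iterative_selection_sort := by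
  intro arr _
  unfold Spec_iterative_selection_sort iterative_selection_sort iterative_selection_sort_alt
  by_cases h0 : arr = []
  · subst h0
    rw [selB_go.eq_def]
    simp [PySem.Int.floordiv]
  · have hlen : 1 ≤ arr.length := by
      cases arr with
      | nil => exact absurd rfl h0
      | cons x t => simp
    simp only [outer_rel, zero_add]
    have hsw := swapLoop arr.length arr 0 0 (by omega)
    simp only [Nat.cast_zero, List.take_zero, List.drop_zero, List.nil_append, zero_add] at hsw
    rw [hsw]
    rw [Prod.mk.injEq]
    refine ⟨?_, rfl⟩
    have hm : ((arr.length : Int) - 1) - 0 = ((arr.length - 1 : Nat) : Int) := by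
      have : ((arr.length - 1 : Nat) : Int) = (arr.length : Int) - 1 := by
        push_cast [Nat.cast_sub hlen]; ring
      omega
    rw [sum_len (arr.length - 1) 0 (arr.length : Int) hm]
    rw [PySem.Int.floordiv_eq_ediv_of_pos (by norm_num)]
    have hcast : ((arr.length : Int)) = ((arr.length - 1 : Nat) : Int) + 1 := by
      push_cast [Nat.cast_sub hlen]; ring
    rw [hcast]
    ring_nf
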